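-- pv_equiv track=rewrite | github.com/ishaansathaye/daily-problems | debugger.py | solution
-- ===== SOURCE A (Python) =====
-- def solution(text):
--     new_text = list(text)
--     for i in range(len(new_text)):
--         if not new_text[i].isalpha():
--             new_text[i] = " "
--     new_text = "".join(new_text)
--     text = new_text.split(" ")
--     text = [i for i in text if i != ""]
--     lengths_list = [len(i) for i in text]
--     return text[lengths_list.index(max(lengths_list))]
-- ===== SOURCE B (Python) =====
-- def _flush(buf, best):
--     # promote the finished word in buf if it is strictly longer than best
--     if buf and (best is None or len(buf) > len(best)):
--         return "".join(buf)
--     return best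
--
--
-- def solution(text):
--     best = None
--     buf = []
--     for ch in text:
--         if ch.isalpha():
--             buf.append(ch)
--         else:
--             best = _flush(buf, best)
--             buf = []
--     best = _flush(buf, best)
--     if best is None:
--         raise ValueError("max() arg is an empty sequence")
--     return best
-- ===== Notes on version B (the rewrite author's own statement) =====
-- stated objective: alternative
-- what changed: Replaces A's multi-pass pipeline (rewrite every non-alpha char to space, join, split, filter, build a lengths list, max, index, subscript) by a single left-to-right scan keeping a current-word buffer and the best word so far (strict > keeps the first longest).
import Mathlib
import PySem

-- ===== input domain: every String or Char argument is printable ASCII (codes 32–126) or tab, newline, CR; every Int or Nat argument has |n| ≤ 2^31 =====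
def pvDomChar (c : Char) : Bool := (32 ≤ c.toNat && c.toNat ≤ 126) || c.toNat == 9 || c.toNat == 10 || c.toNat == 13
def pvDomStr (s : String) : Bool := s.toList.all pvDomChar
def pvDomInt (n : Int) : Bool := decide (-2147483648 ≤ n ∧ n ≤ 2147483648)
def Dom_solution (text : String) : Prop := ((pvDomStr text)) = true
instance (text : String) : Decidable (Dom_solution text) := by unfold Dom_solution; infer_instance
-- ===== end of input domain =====

-- B replaces A's multi-pass rewrite/join/split/filter/max/index pipeline by a single scan
-- keeping the current word and the best-so-far word (objective: alternative, same cost).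


-- ===== PORT A =====
def solution (text : String) : String :=
  let new_text := text.toList.map (fun c => if PySem.Chars.isalpha c then c else ' ')
  let pieces := PySem.Chars.splitOn new_text [' ']
  let words := pieces.filter (fun w => decide (w ≠ []))
  let lengths := words.map (fun w => PySem.Chars.len w)
  match PySem.List.max? lengths (fun x => x) with
  | none => ""           -- max([]) raises ValueError: excluded by Pre_solution
  | some m =>
    match PySem.List.index? lengths m with
    | some k => String.ofList (words.getD k [])
    | none => ""         -- unreachable: m is a member of lengths

-- ===== PORT B =====
-- _flush of Source B
def pvFlush (buf : List Char) (best : Option (List Char)) : Option (List Char) :=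
  match best with
  | none => if buf = [] then none else some buf
  | some b => if buf ≠ [] ∧ b.length < buf.length then some buf else some b

-- the for-loop of Source B, followed by the final flush
def pvLoop : List Char → List Char → Option (List Char) → Option (List Char)
  | [], buf, best => pvFlush buf best
  | c :: rest, buf, best =>
    if PySem.Chars.isalpha c then pvLoop rest (buf ++ [c]) best
    else pvLoop rest [] (pvFlush buf best)

def solution_alt (text : String) : String :=
  match pvLoop text.toList [] none with
  | some w => String.ofList w
  | none => ""           -- Source B raises ValueError here: excluded by Pre_solution

-- ===== PRECONDITION & SPEC =====
-- Pre_ excludes exactly the inputs with no alphabetic character, on which A's max([]) raises ValueError.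
def Pre_solution (text : String) : Prop := text.toList.any PySem.Chars.isalpha = true
instance (text : String) : Decidable (Pre_solution text) := by unfold Pre_solution; infer_instance
def pvWitness_solution : String := "hi there"

def Spec_solution (text : String) (out : String) : Prop := out = solution_alt text
instance (text : String) (out : String) : Decidable (Spec_solution text out) := by unfold Spec_solution; infer_instance

-- ===== CLAIM (what is proved, stated in full; the proofs are below) =====
def Claim_equal_solution : Prop := ∀ (text : String), Dom_solution text → Pre_solution text → Spec_solution text (solution text)

-- ===== LEMMAS AND PROOFS =====

-- structural form of splitting on a single space, with the current piece carried in order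
def pvSplit : List Char → List Char → List (List Char)
  | cur, [] => [cur]
  | cur, c :: rest => if c = ' ' then cur :: pvSplit [] rest else pvSplit (cur ++ [c]) rest

-- the alphabetic words of cs, with a pending buffer cur
def pvWords : List Char → List Char → List (List Char)
  | cur, [] => if cur = [] then [] else [cur]
  | cur, c :: rest =>
    if PySem.Chars.isalpha c then pvWords (cur ++ [c]) rest
    else (if cur = [] then [] else [cur]) ++ pvWords [] rest

-- first longest element of w :: t
def pvFM : List Char → List (List Char) → List Char
  | w, [] => w
  | w, x :: t => if w.length < x.length then pvFM x t else pvFM w t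

lemma pvGo_spec : ∀ (fuel : Nat) (l cur : List Char) (acc : List (List Char)),
    l.length < fuel →
    PySem.Chars.splitOn.go [' '] fuel l cur acc = acc.reverse ++ pvSplit cur.reverse l := by
  intro fuel
  induction fuel with
  | zero => intro l cur acc h; omega
  | succ n ih =>
    intro l cur acc h
    cases l with
    | nil => simp [PySem.Chars.splitOn.go, pvSplit]
    | cons c rest =>
      by_cases hc : c = ' '
      · subst hc
        have hp : List.isPrefixOf [' '] (' ' :: rest) = true := by
          simp [List.isPrefixOf]
        rw [PySem.Chars.splitOn.go, if_pos hp]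
        simp only [List.length_cons] at h
        rw [ih _ _ _ (by simpa using Nat.lt_of_succ_lt_succ h)]
        simp [pvSplit]
      · have hp : List.isPrefixOf [' '] (c :: rest) = false := by
          simp only [List.isPrefixOf, Bool.and_true]
          exact decide_eq_false (Ne.symm hc)
        rw [PySem.Chars.splitOn.go, if_neg (by simp [hp])]
        simp only [List.length_cons] at h
        rw [ih _ _ _ (Nat.lt_of_succ_lt_succ h)]
        simp [pvSplit, hc]

lemma pvSplitOn_eq (l : List Char) : PySem.Chars.splitOn l [' '] = pvSplit [] l := by
  show PySem.Chars.splitOn.go [' '] (l.length + 1) l [] [] = pvSplit [] l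
  rw [pvGo_spec (l.length + 1) l [] [] (Nat.lt_succ_self _)]
  simp

lemma pvFilter_split : ∀ (cs cur : List Char),
    (pvSplit cur (cs.map (fun c => if PySem.Chars.isalpha c then c else ' '))).filter
        (fun w => decide (w ≠ [])) =
      pvWords cur cs := by
  intro cs
  induction cs with
  | nil =>
    intro cur
    by_cases h : cur = [] <;> simp [pvSplit, pvWords, h]
  | cons c rest ih =>
    intro cur
    by_cases ha : PySem.Chars.isalpha c
    · have hc : c ≠ ' ' := by
        intro h; rw [h] at ha; exact absurd ha (by decide)
      simp only [List.map_cons, if_pos ha, pvSplit, if_neg hc, pvWords]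
      rw [ih]
    · simp only [List.map_cons, if_neg ha, pvWords]
      show (pvSplit cur (' ' :: _)).filter _ = _
      rw [pvSplit, if_pos rfl, List.filter_cons]
      by_cases h : cur = []
      · rw [if_neg (by simp [h]), ih []]
        simp [h]
      · rw [if_pos (by simp [h]), ih []]
        simp [h]

lemma pvWords_ne : ∀ (cs cur : List Char) (w : List Char), w ∈ pvWords cur cs → w ≠ [] := by
  intro cs
  induction cs with
  | nil =>
    intro cur w hw
    by_cases h : cur = []
    · simp [pvWords, h] at hw
    · simp only [pvWords, if_neg h, List.mem_singleton] at hw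
      exact hw ▸ h
  | cons c rest ih =>
    intro cur w hw
    by_cases ha : PySem.Chars.isalpha c
    · simp only [pvWords, if_pos ha] at hw
      exact ih _ _ hw
    · simp only [pvWords, if_neg ha] at hw
      rcases List.mem_append.mp hw with h1 | h2
      · by_cases h : cur = [] <;> simp [h] at h1
        exact h1 ▸ h
      · exact ih _ _ h2

lemma pvFlush_nil (best : Option (List Char)) : pvFlush [] best = best := by
  cases best <;> simp [pvFlush]

lemma pvLoop_spec : ∀ (cs cur : List Char) (best : Option (List Char)),
    pvLoop cs cur best = (pvWords cur cs).foldl (fun b w => pvFlush w b) best := by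
  intro cs
  induction cs with
  | nil =>
    intro cur best
    by_cases h : cur = [] <;> simp [pvLoop, pvWords, h, pvFlush_nil]
  | cons c rest ih =>
    intro cur best
    by_cases ha : PySem.Chars.isalpha c
    · simp only [pvLoop, if_pos ha, pvWords]
      rw [ih]
    · simp only [pvLoop, if_neg ha, pvWords, List.foldl_append]
      rw [ih]
      by_cases h : cur = [] <;> simp [h, pvFlush_nil]

lemma pvFold_fm : ∀ (t : List (List Char)) (w : List Char),
    (∀ x ∈ t, x ≠ []) → w ≠ [] →
    t.foldl (fun b x => pvFlush x b) (some w) = some (pvFM w t) := by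
  intro t
  induction t with
  | nil => intro w _ _; simp [pvFM]
  | cons x t ih =>
    intro w hne hw
    have hx : x ≠ [] := hne x (by simp)
    have hrest : ∀ y ∈ t, y ≠ [] := fun y hy => hne y (by simp [hy])
    simp only [List.foldl_cons, pvFM]
    by_cases h : w.length < x.length
    · rw [if_pos h]
      have : pvFlush x (some w) = some x := by simp [pvFlush, hx, h]
      rw [this, ih x hrest hx]
    · rw [if_neg h]
      have : pvFlush x (some w) = some w := by simp [pvFlush, h]
      rw [this, ih w hrest hw]

lemma pvFM_ge : ∀ (t : List (List Char)) (w : List Char), w.length ≤ (pvFM w t).length := by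
  intro t
  induction t with
  | nil => intro w; simp [pvFM]
  | cons x t ih =>
    intro w
    simp only [pvFM]
    by_cases h : w.length < x.length
    · rw [if_pos h]; exact le_trans (le_of_lt h) (ih x)
    · rw [if_neg h]; exact ih w

lemma pvFM_eq_or_gt : ∀ (t : List (List Char)) (w : List Char),
    pvFM w t = w ∨ w.length < (pvFM w t).length := by
  intro t
  induction t with
  | nil => intro w; left; simp [pvFM]
  | cons x t ih =>
    intro w
    simp only [pvFM]
    by_cases h : w.length < x.length
    · rw [if_pos h]; right; exact lt_of_lt_of_le h (pvFM_ge t x)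
    · rw [if_neg h]; exact ih w

lemma pvFM_len : ∀ (t : List (List Char)) (w : List Char),
    ((pvFM w t).length : Int) =
      (t.map (fun x => ((x.length : Nat) : Int))).foldl max ((w.length : Nat) : Int) := by
  intro t
  induction t with
  | nil => intro w; simp [pvFM]
  | cons x t ih =>
    intro w
    simp only [pvFM, List.map_cons, List.foldl_cons]
    by_cases h : w.length < x.length
    · rw [if_pos h, ih x]
      congr 1
      omega
    · rw [if_neg h, ih w]
      congr 1
      omega

lemma pvSel : ∀ (t : List (List Char)) (w : List Char),
    ∃ k, PySem.List.index? ((w :: t).map (fun x => ((x.length : Nat) : Int)))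
          ((pvFM w t).length : Int) = some k ∧
        (w :: t).getD k [] = pvFM w t := by
  intro t
  induction t with
  | nil =>
    intro w
    refine ⟨0, ?_, rfl⟩
    simp [pvFM]
  | cons x t ih =>
    intro w
    by_cases h : w.length < x.length
    · -- pvFM w (x::t) = pvFM x t, longer than w
      have hfm : pvFM w (x :: t) = pvFM x t := by simp [pvFM, h]
      have hgt : w.length < (pvFM x t).length := lt_of_lt_of_le h (pvFM_ge t x)
      obtain ⟨k, hk, hget⟩ := ih x
      refine ⟨k + 1, ?_, ?_⟩
      · rw [hfm, List.map_cons,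
          PySem.List.index?_cons_of_ne _ (by intro hne; omega), hk]
        rfl
      · rw [hfm]; simpa using hget
    · have hfm : pvFM w (x :: t) = pvFM w t := by simp [pvFM, h]
      rcases pvFM_eq_or_gt t w with heq | hgt
      · refine ⟨0, ?_, ?_⟩
        · rw [hfm, heq, List.map_cons, PySem.List.index?_cons_self]
        · simp [hfm, heq]
      · -- strictly longer than both w and x
        have hx : x.length < (pvFM w t).length := lt_of_le_of_lt (le_of_not_gt h) hgt
        obtain ⟨k, hk, hget⟩ := ih w
        -- decompose hk: head w.length ≠ m
        rw [List.map_cons,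
          PySem.List.index?_cons_of_ne _ (by intro hne; omega)] at hk
        cases hj : PySem.List.index? (t.map (fun x => ((x.length : Nat) : Int)))
            ((pvFM w t).length : Int) with
        | none => rw [hj] at hk; simp at hk
        | some j =>
          rw [hj] at hk
          simp only [Option.map_some] at hk
          have hkj : k = j + 1 := by injection hk with h'; omega
          refine ⟨j + 2, ?_, ?_⟩
          · rw [hfm, List.map_cons,
              PySem.List.index?_cons_of_ne _ (by intro hne; omega),
              List.map_cons,
              PySem.List.index?_cons_of_ne _ (by intro hne; omega),
              hj]
            rfl
          · have : (w :: t).getD k [] = t.getD j [] := by rw [hkj]; rfl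
            rw [hfm, ← hget, this]
            rfl

lemma pvWords_nil_iff : ∀ (cs cur : List Char),
    pvWords cur cs = [] ↔ cur = [] ∧ cs.any PySem.Chars.isalpha = false := by
  intro cs
  induction cs with
  | nil =>
    intro cur
    by_cases h : cur = [] <;> simp [pvWords, h]
  | cons c rest ih =>
    intro cur
    by_cases ha : PySem.Chars.isalpha c
    · simp only [pvWords, if_pos ha]
      rw [ih]
      simp [ha]
    · simp only [pvWords, if_neg ha, List.any_cons]
      by_cases h : cur = [] <;> simp [h, ih, ha]

-- ===== VERDICT (by name: the statement is the Claim_ definition above) =====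
theorem solution_spec : Claim_equal_solution := by
  intro text _hdom hpre
  unfold Spec_solution solution solution_alt
  simp only [pvSplitOn_eq, pvFilter_split, pvLoop_spec]
  have hne : pvWords [] text.toList ≠ [] := by
    rw [Ne, pvWords_nil_iff]
    rintro ⟨-, h2⟩
    unfold Pre_solution at hpre
    rw [hpre] at h2
    cases h2
  cases hw : pvWords [] text.toList with
  | nil => exact absurd hw hne
  | cons w t =>
    have hwne : ∀ x ∈ w :: t, x ≠ [] := by
      intro x hx; exact pvWords_ne text.toList [] x (hw ▸ hx)
    have hw0 : w ≠ [] := hwne w (by simp)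
    have ht : ∀ x ∈ t, x ≠ [] := fun x hx => hwne x (by simp [hx])
    -- B side
    have hB : (w :: t).foldl (fun b x => pvFlush x b) none = some (pvFM w t) := by
      simp only [List.foldl_cons]
      have : pvFlush w none = some w := by simp [pvFlush, hw0]
      rw [this, pvFold_fm t w ht hw0]
    -- A side
    have hmax : PySem.List.max? ((w :: t).map (fun x => ((x.length : Nat) : Int)))
        (fun x => x) = some ((pvFM w t).length : Int) := by
      simp only [PySem.Chars.len_eq, List.map_cons, PySem.List.max?_id_cons]
      rw [pvFM_len]
    obtain ⟨k, hk, hget⟩ := pvSel t w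
    simp only [PySem.Chars.len_eq, hmax, hB, hk, hget]
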